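-- pv_equiv track=rewrite | github.com/aws-samples/sample-manufacturing-automotive-ai-toolkit | agents_catalog/multi_agent_collaboration/04-Vehicle_Data_Discovery/repo/pipeline/tesla_s3_vectors_behavioral_embeddings.py | extract_behavioral_keywords
-- ===== SOURCE A (Python) =====
-- from typing import Dict, Any, List, Tuple
--
-- def extract_behavioral_keywords(scene_description: str) -> List[str]:
--     """Extract key behavioral keywords from scene description"""
--     keywords = []
--     text_lower = scene_description.lower()
--
--     # Behavioral patterns
--     if any(word in text_lower for word in ['construction', 'work zone', 'barriers']):
--         keywords.append('construction zone')
--     if any(word in text_lower for word in ['pedestrian', 'crosswalk', 'walking']):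
--         keywords.append('pedestrian interaction')
--     if any(word in text_lower for word in ['lane change', 'merging', 'changing lanes']):
--         keywords.append('lane change')
--     if any(word in text_lower for word in ['intersection', 'turning', 'traffic light']):
--         keywords.append('intersection')
--     if any(word in text_lower for word in ['following', 'behind', 'distance']):
--         keywords.append('following behavior')
--     if any(word in text_lower for word in ['speed', 'slow', 'accelerat', 'brake']):
--         keywords.append('speed change')
--
--     return keywords
-- ===== SOURCE B (Python) =====
-- # Single left-to-right scan over the text: at each position, check which trigger
-- # words start there, collecting their tags into a set; finally emit tags in the
-- # canonical order.  (A instead runs one substring-membership test per pattern.)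
-- WORD_TAGS = [
--     ('construction', 'construction zone'),
--     ('work zone', 'construction zone'),
--     ('barriers', 'construction zone'),
--     ('pedestrian', 'pedestrian interaction'),
--     ('crosswalk', 'pedestrian interaction'),
--     ('walking', 'pedestrian interaction'),
--     ('lane change', 'lane change'),
--     ('merging', 'lane change'),
--     ('changing lanes', 'lane change'),
--     ('intersection', 'intersection'),
--     ('turning', 'intersection'),
--     ('traffic light', 'intersection'),
--     ('following', 'following behavior'),
--     ('behind', 'following behavior'),
--     ('distance', 'following behavior'),
--     ('speed', 'speed change'),
--     ('slow', 'speed change'),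
--     ('accelerat', 'speed change'),
--     ('brake', 'speed change'),
-- ]
-- TAG_ORDER = ['construction zone', 'pedestrian interaction', 'lane change',
--              'intersection', 'following behavior', 'speed change']
--
-- def extract_behavioral_keywords(scene_description):
--     text = scene_description.lower()
--     found = set()
--     for i in range(len(text)):
--         for word, tag in WORD_TAGS:
--             if text.startswith(word, i):
--                 found.add(tag)
--     return [tag for tag in TAG_ORDER if tag in found]
-- ===== Notes on version B (the rewrite author's own statement) =====
-- stated objective: alternative
-- what changed: Instead of one substring-membership test per pattern, B makes a single left-to-right scan over the text positions, matching a flat word-to-tag table at each position into a set of found tags and finally emitting the tags in canonical order.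
import Mathlib
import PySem

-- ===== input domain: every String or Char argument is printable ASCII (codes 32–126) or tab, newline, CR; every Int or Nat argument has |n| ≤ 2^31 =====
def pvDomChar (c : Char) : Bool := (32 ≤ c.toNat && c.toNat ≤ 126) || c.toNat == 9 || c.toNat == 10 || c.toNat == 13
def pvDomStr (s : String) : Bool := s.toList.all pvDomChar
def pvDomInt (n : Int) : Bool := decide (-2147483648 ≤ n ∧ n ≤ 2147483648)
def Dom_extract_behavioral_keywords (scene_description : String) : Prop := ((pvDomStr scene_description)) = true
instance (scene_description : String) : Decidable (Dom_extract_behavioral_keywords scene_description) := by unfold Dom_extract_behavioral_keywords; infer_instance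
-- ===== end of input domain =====

-- B replaces A's per-pattern substring-membership tests with a single left-to-right scan of the text positions, matching a flat word→tag table at each position into a set of found tags emitted in canonical order (objective: alternative; return value only).


-- ===== PORT A =====
def extract_behavioral_keywords (scene_description : String) : List String :=
  let text_lower := PySem.Str.lower scene_description
  let keywords : List String := []
  let keywords := if ["construction", "work zone", "barriers"].any (fun word => PySem.Str.isIn word text_lower) then keywords ++ ["construction zone"] else keywords
  let keywords := if ["pedestrian", "crosswalk", "walking"].any (fun word => PySem.Str.isIn word text_lower) then keywords ++ ["pedestrian interaction"] else keywords
  let keywords := if ["lane change", "merging", "changing lanes"].any (fun word => PySem.Str.isIn word text_lower) then keywords ++ ["lane change"] else keywords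
  let keywords := if ["intersection", "turning", "traffic light"].any (fun word => PySem.Str.isIn word text_lower) then keywords ++ ["intersection"] else keywords
  let keywords := if ["following", "behind", "distance"].any (fun word => PySem.Str.isIn word text_lower) then keywords ++ ["following behavior"] else keywords
  let keywords := if ["speed", "slow", "accelerat", "brake"].any (fun word => PySem.Str.isIn word text_lower) then keywords ++ ["speed change"] else keywords
  keywords

-- ===== PORT B =====
-- the flat word→tag table of Source B
def pvWordTags : List (String × String) :=
  [("construction", "construction zone"), ("work zone", "construction zone"), ("barriers", "construction zone"),
   ("pedestrian", "pedestrian interaction"), ("crosswalk", "pedestrian interaction"), ("walking", "pedestrian interaction"),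
   ("lane change", "lane change"), ("merging", "lane change"), ("changing lanes", "lane change"),
   ("intersection", "intersection"), ("turning", "intersection"), ("traffic light", "intersection"),
   ("following", "following behavior"), ("behind", "following behavior"), ("distance", "following behavior"),
   ("speed", "speed change"), ("slow", "speed change"), ("accelerat", "speed change"), ("brake", "speed change")]

def pvTagOrder : List String :=
  ["construction zone", "pedestrian interaction", "lane change", "intersection", "following behavior", "speed change"]

-- Exact ports of Source B's constructs: 'range(len(text))' = List.range (all indices are ≥ 0);
-- 'text.startswith(word, i)' with 0 ≤ i = PySem.Chars.startswith (text.drop i) word on code points.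
def extract_behavioral_keywords_alt (scene_description : String) : List String :=
  let text := (PySem.Str.lower scene_description).toList
  let found := (List.range text.length).foldl
    (fun acc i => pvWordTags.foldl
      (fun acc p => if PySem.Chars.startswith (text.drop i) p.1.toList then PySem.Set.add acc p.2 else acc) acc)
    PySem.Set.empty
  pvTagOrder.filter (fun tag => PySem.Set.contains found tag)

-- ===== PRECONDITION & SPEC =====
def Spec_extract_behavioral_keywords (scene_description : String) (out : List String) : Prop := out = extract_behavioral_keywords_alt scene_description
instance (scene_description : String) (out : List String) : Decidable (Spec_extract_behavioral_keywords scene_description out) := by unfold Spec_extract_behavioral_keywords; infer_instance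

-- ===== CLAIM (what is proved, stated in full; the proofs are below) =====
def Claim_equal_extract_behavioral_keywords : Prop := ∀ (scene_description : String), Dom_extract_behavioral_keywords scene_description → Spec_extract_behavioral_keywords scene_description (extract_behavioral_keywords scene_description)

-- ===== LEMMAS AND PROOFS =====

-- membership in the inner fold over the word table
theorem mem_inner_fold (text : List Char) (i : Nat) (acc : PySem.Set String) (y : String) :
    y ∈ pvWordTags.foldl
      (fun acc p => if PySem.Chars.startswith (text.drop i) p.1.toList then PySem.Set.add acc p.2 else acc) acc ↔
    y ∈ acc ∨ ∃ p ∈ pvWordTags, PySem.Chars.startswith (text.drop i) p.1.toList = true ∧ p.2 = y := by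
  generalize pvWordTags = l
  induction l generalizing acc with
  | nil => simp
  | cons p t ih =>
    simp only [List.foldl_cons, ih, List.mem_cons]
    split
    · simp only [PySem.Set.mem_add]
      constructor
      · rintro (⟨h | h⟩ | ⟨q, hq, hsw, hy⟩)
        · exact Or.inl h
        · exact Or.inr ⟨p, Or.inl rfl, by simp_all⟩
        · exact Or.inr ⟨q, Or.inr hq, hsw, hy⟩
      · rintro (h | ⟨q, (rfl | hq), hsw, hy⟩)
        · exact Or.inl (Or.inl h)
        · exact Or.inl (Or.inr hy.symm)
        · exact Or.inr ⟨q, hq, hsw, hy⟩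
    · constructor
      · rintro (h | ⟨q, hq, hsw, hy⟩)
        · exact Or.inl h
        · exact Or.inr ⟨q, Or.inr hq, hsw, hy⟩
      · rintro (h | ⟨q, (rfl | hq), hsw, hy⟩)
        · exact Or.inl h
        · simp_all
        · exact Or.inr ⟨q, hq, hsw, hy⟩

-- membership in the outer fold over the positions
theorem mem_outer_fold (text : List Char) (l : List Nat) (acc : PySem.Set String) (y : String) :
    y ∈ l.foldl
      (fun acc i => pvWordTags.foldl
        (fun acc p => if PySem.Chars.startswith (text.drop i) p.1.toList then PySem.Set.add acc p.2 else acc) acc) acc ↔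
    y ∈ acc ∨ ∃ i ∈ l, ∃ p ∈ pvWordTags, PySem.Chars.startswith (text.drop i) p.1.toList = true ∧ p.2 = y := by
  induction l generalizing acc with
  | nil => simp
  | cons i t ih =>
    simp only [List.foldl_cons, ih, mem_inner_fold, List.mem_cons]
    constructor
    · rintro (h | ⟨j, hj, hp⟩)
      · rcases h with h | ⟨p, hp, hsw, hy⟩
        · exact Or.inl h
        · exact Or.inr ⟨i, Or.inl rfl, p, hp, hsw, hy⟩
      · exact Or.inr ⟨j, Or.inr hj, hp⟩
    · rintro (h | ⟨j, (rfl | hj), hp⟩)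
      · exact Or.inl (Or.inl h)
      · exact Or.inl (Or.inr hp)
      · exact Or.inr ⟨j, hj, hp⟩

-- a nonempty word starts at some scanned position iff it is a substring
theorem exists_pos_startswith_iff (text : List Char) (w : List Char) (hw : w ≠ []) :
    (∃ i ∈ List.range text.length, PySem.Chars.startswith (text.drop i) w = true) ↔
    PySem.Chars.isIn w text = true := by
  rw [← PySem.Chars.exists_prefix_drop_iff_isIn]
  constructor
  · rintro ⟨i, _, h⟩
    exact ⟨i, (PySem.Chars.startswith_iff _ _).1 h⟩
  · rintro ⟨j, hj⟩
    by_cases hjl : j < text.length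
    · exact ⟨j, List.mem_range.2 hjl, (PySem.Chars.startswith_iff _ _).2 hj⟩
    · exfalso
      rw [List.drop_eq_nil_of_le (le_of_not_gt hjl)] at hj
      exact hw (List.prefix_nil.1 hj)

-- the found-set membership characterisation for each tag
theorem contains_found (text : List Char) (y : String) :
    PySem.Set.contains
      ((List.range text.length).foldl
        (fun acc i => pvWordTags.foldl
          (fun acc p => if PySem.Chars.startswith (text.drop i) p.1.toList then PySem.Set.add acc p.2 else acc) acc)
        PySem.Set.empty) y =
    pvWordTags.any (fun p => PySem.Chars.isIn p.1.toList text && p.2 == y) := by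
  rw [Bool.eq_iff_iff, PySem.Set.contains_iff, mem_outer_fold, List.any_eq_true]
  constructor
  · rintro (h | ⟨i, hi, p, hp, hsw, hy⟩)
    · simp [PySem.Set.empty] at h
    · refine ⟨p, hp, ?_⟩
      have hw : p.1.toList ≠ [] := by
        fin_cases hp <;> simp
      rw [Bool.and_eq_true, beq_iff_eq]
      exact ⟨(exists_pos_startswith_iff text _ hw).1 ⟨i, hi, hsw⟩, hy⟩
  · rintro ⟨p, hp, h⟩
    rw [Bool.and_eq_true, beq_iff_eq] at h
    have hw : p.1.toList ≠ [] := by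
      fin_cases hp <;> simp
    obtain ⟨i, hi, hsw⟩ := (exists_pos_startswith_iff text _ hw).2 h.1
    exact Or.inr ⟨i, hi, p, hp, hsw, h.2⟩

-- ===== VERDICT (by name: the statement is the Claim_ definition above) =====
set_option maxHeartbeats 1000000 in
theorem extract_behavioral_keywords_spec : Claim_equal_extract_behavioral_keywords := by
  intro s _
  unfold Spec_extract_behavioral_keywords
  simp only [extract_behavioral_keywords, extract_behavioral_keywords_alt, contains_found]
  simp only [pvWordTags, pvTagOrder, List.any_cons, List.any_nil, List.filter_cons,
    List.filter_nil, PySem.Str.isIn_eq]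
  simp only [String.reduceBEq, Bool.and_true, Bool.and_false,
    Bool.or_false, Bool.false_or]
  split_ifs <;> rfl
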